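-- pv_equiv track=rewrite | github.com/pypi-data/pypi-mirror-16 | packages/yandc/yandc-0.2a.tar.gz/yandc-0.2a/yandc_ros/config.py | export_concat
-- ===== SOURCE A (Python) =====
-- def export_concat(export_config):
-- 	export_section = None
-- 	line_buffer = []
--
-- 	concat_config = []
-- 	for line in export_config:
-- 		if line == '':
-- 			continue
-- 		if line[0] == '/':
-- 			export_section = line
-- 			continue
-- 		elif line[0] == '#':
-- 			continue
-- 		elif line[-1:] == '\\':
-- 			line_buffer.append(line[:-1].lstrip())
-- 		else:
-- 			if export_section is None:
-- 				raise ValueError('No configuration section')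
-- 			line_buffer.append(line.lstrip())
-- 			line_buffer.insert(0, '{} '.format(export_section))
-- 			concat_config.append(''.join(line_buffer))
-- 			line_buffer = []
-- 	return concat_config
-- ===== SOURCE B (Python) =====
-- def export_concat(export_config):
--     # Pass 1: group lines into records (section, pieces), in input order.
--     records = []
--     section = None
--     buffer = []
--     for line in export_config:
--         if not line or line.startswith('#'):
--             continue
--         if line.startswith('/'):
--             section = line
--             continue
--         if line.endswith('\\'):
--             buffer.append(line[:-1].lstrip())
--         else:
--             buffer.append(line.lstrip())
--             records.append((section, buffer))
--             buffer = []
--     # Pass 2: validate and emit each record, in order.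
--     result = []
--     for section, pieces in records:
--         if section is None:
--             raise ValueError('No configuration section')
--         result.append(section + ' ' + ''.join(pieces))
--     return result
-- ===== Notes on version B (the rewrite author's own statement) =====
-- stated objective: alternative
-- what changed: Single interleaved loop with insert-at-front-then-join replaced by a two-pass decomposition: pass one groups lines into (section, pieces) records, pass two validates each record and emits section + ' ' + joined pieces.
import Mathlib
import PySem

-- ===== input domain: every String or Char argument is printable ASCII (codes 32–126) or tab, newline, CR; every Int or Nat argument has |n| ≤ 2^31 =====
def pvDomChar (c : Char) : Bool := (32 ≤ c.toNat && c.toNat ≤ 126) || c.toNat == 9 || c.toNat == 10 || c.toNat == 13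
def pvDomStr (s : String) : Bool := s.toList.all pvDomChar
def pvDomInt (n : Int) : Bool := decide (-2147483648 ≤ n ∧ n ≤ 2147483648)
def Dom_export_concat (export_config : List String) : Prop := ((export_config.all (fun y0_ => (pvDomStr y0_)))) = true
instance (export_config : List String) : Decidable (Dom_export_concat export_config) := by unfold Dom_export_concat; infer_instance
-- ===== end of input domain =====

-- B replaces A's single interleaved loop by a two-pass decomposition (group lines into
-- (section, pieces) records, then validate and emit each record); alternative, not faster.

-- ===== PORT A =====
def exportALoop (sec : Option String) (buf acc : List String) : List String → List String
  | [] => acc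
  | line :: rest =>
    if line = "" then exportALoop sec buf acc rest
    else if PySem.Str.pyGet? line 0 = some '/' then exportALoop (some line) buf acc rest
    else if PySem.Str.pyGet? line 0 = some '#' then exportALoop sec buf acc rest
    else if PySem.Str.slice line (some (-1)) none = "\\" then
      exportALoop sec (buf ++ [PySem.Str.lstrip (PySem.Str.slice line none (some (-1)))]) acc rest
    else
      match sec with
      | none => acc     -- Python raises ValueError('No configuration section') here; excluded by Pre_
      | some s =>
        exportALoop sec [] (acc ++ [PySem.Str.join "" ((s ++ " ") :: (buf ++ [PySem.Str.lstrip line]))]) rest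

def export_concat (export_config : List String) : List String :=
  exportALoop none [] [] export_config

-- ===== PORT B =====
def exportRecsLoop (sec : Option String) (buf : List String) : List String → List (Option String × List String)
  | [] => []
  | line :: rest =>
    if line = "" || PySem.Str.startswith line "#" then exportRecsLoop sec buf rest
    else if PySem.Str.startswith line "/" then exportRecsLoop (some line) buf rest
    else if PySem.Str.endswith line "\\" then
      exportRecsLoop sec (buf ++ [PySem.Str.lstrip (PySem.Str.slice line none (some (-1)))]) rest
    else (sec, buf ++ [PySem.Str.lstrip line]) :: exportRecsLoop sec [] rest

def exportEmit : List (Option String × List String) → List String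
  | [] => []
  | (none, _) :: _ => []    -- Python raises ValueError('No configuration section') here; excluded by Pre_
  | (some s, pieces) :: rest => (s ++ " " ++ PySem.Str.join "" pieces) :: exportEmit rest

def export_concat_alt (export_config : List String) : List String :=
  exportEmit (exportRecsLoop none [] export_config)

-- ===== PRECONDITION & SPEC =====
-- a "terminating" line: nonempty, no '/' or '#' start, no trailing backslash (triggers record emission)
def pvIsTermLine (line : String) : Bool :=
  (line != "") && !PySem.Str.startswith line "/" && !PySem.Str.startswith line "#" && !PySem.Str.endswith line "\\"

-- Pre_ excludes exactly the inputs on which A raises ValueError('No configuration section'):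
-- those with a terminating line before the first section line (a line starting with '/').
def Pre_export_concat (export_config : List String) : Prop :=
  ((export_config.takeWhile (fun l => !PySem.Str.startswith l "/")).all (fun l => !pvIsTermLine l)) = true
instance (export_config : List String) : Decidable (Pre_export_concat export_config) := by
  unfold Pre_export_concat; infer_instance

def pvWitness_export_concat : List String := ["/ip firewall", "add chain=input \\", "  protocol=tcp", "#c", ""]

def Spec_export_concat (export_config : List String) (out : List String) : Prop := out = export_concat_alt export_config
instance (export_config : List String) (out : List String) : Decidable (Spec_export_concat export_config out) := by unfold Spec_export_concat; infer_instance

-- ===== CLAIM (what is proved, stated in full; the proofs are below) =====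
def Claim_equal_export_concat : Prop := ∀ (export_config : List String), Dom_export_concat export_config → Pre_export_concat export_config → Spec_export_concat export_config (export_concat export_config)

-- ===== LEMMAS AND PROOFS =====

lemma pv_join_cons (s : String) (l : List String) :
    PySem.Str.join "" (s :: l) = s ++ PySem.Str.join "" l := by
  apply String.toList_inj.mp
  simp [PySem.Str.join]
  cases l <;> simp [PySem.Chars.join, List.intercalate]

lemma pv_first_char (line p : String) (c : Char) (hp : p.toList = [c]) (h : ¬ line = "") :
    (PySem.Str.pyGet? line 0 = some c) ↔ PySem.Str.startswith line p = true := by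
  rw [show ((0:Int)) = ((0:Nat):Int) from rfl, PySem.Str.pyGet?_natCast, PySem.Str.startswith_eq]
  cases hl : line.toList with
  | nil => simp_all
  | cons a cs =>
    simp only [List.getElem?_cons_zero, Option.some_inj]
    rw [hp]
    simp [PySem.Chars.startswith]
    exact eq_comm

lemma pv_last_char (line : String) :
    (PySem.Str.slice line (some (-1)) none = "\\") ↔ PySem.Str.endswith line "\\" = true := by
  rw [PySem.Str.endswith_eq, ← String.toList_inj]
  simp only [PySem.Str.toList_slice, PySem.Chars.slice_eq_listSlice]
  rw [show ("\\" : String).toList = ['\\'] from rfl]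
  rcases List.eq_nil_or_concat line.toList with h | ⟨t, c, h⟩ <;>
    [skip; rw [List.concat_eq_append] at h] <;> rw [h]
  · constructor <;> intro hx
    · simp [PySem.List.slice] at hx
    · rw [PySem.Chars.endswith_iff] at hx
      simp at hx
  · rw [show PySem.List.slice (t ++ [c]) (some (-1)) none = [c] from by simp [PySem.List.slice]]
    rw [show (PySem.Chars.endswith (t ++ [c]) ['\\'] = true) = (['\\'] <:+ t ++ [c]) from
      propext (PySem.Chars.endswith_iff _ _)]
    rw [← List.reverse_prefix]
    simp [eq_comm]

lemma pv_main (rest : List String) : ∀ (sec : Option String) (buf acc : List String),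
    (sec = none → ((rest.takeWhile (fun l => !PySem.Str.startswith l "/")).all (fun l => !pvIsTermLine l)) = true) →
    exportALoop sec buf acc rest = acc ++ exportEmit (exportRecsLoop sec buf rest) := by
  induction rest with
  | nil => intro sec buf acc _; simp [exportALoop, exportRecsLoop, exportEmit]
  | cons line rest ih =>
    intro sec buf acc hpre
    by_cases h0 : line = ""
    · subst h0
      have hpre' : sec = none → ((rest.takeWhile (fun l => !PySem.Str.startswith l "/")).all (fun l => !pvIsTermLine l)) = true := by
        intro hsec
        have h2 := hpre hsec
        rw [List.takeWhile_cons] at h2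
        simp [pvIsTermLine, PySem.Chars.startswith] at h2
        simp [pvIsTermLine, PySem.Chars.startswith]
        exact h2
      simp only [exportALoop, exportRecsLoop]
      rw [if_pos trivial, if_pos (by decide)]
      exact ih sec buf acc hpre'
    by_cases hs : PySem.Str.pyGet? line 0 = some '/'
    · have hsw : PySem.Str.startswith line "/" = true := (pv_first_char line "/" '/' rfl h0).mp hs
      have hsh : PySem.Str.startswith line "#" = false := by
        by_contra hc
        have := (pv_first_char line "#" '#' rfl h0).mpr (by simpa using hc)
        rw [this] at hs; simp at hs
      have hsh' : PySem.Chars.startswith line.toList ['#'] = false := by simpa using hsh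
      simp only [exportALoop, exportRecsLoop]
      rw [if_neg h0, if_pos hs]
      rw [show (line = "" || PySem.Str.startswith line "#") = false from by simp [h0, hsh']]
      rw [if_neg (by simp), if_pos hsw]
      exact ih (some line) buf acc (by intro hc; cases hc)
    by_cases hh : PySem.Str.pyGet? line 0 = some '#'
    · have hsh : PySem.Str.startswith line "#" = true := (pv_first_char line "#" '#' rfl h0).mp hh
      have hsw : PySem.Str.startswith line "/" = false := by
        by_contra hc
        have := (pv_first_char line "/" '/' rfl h0).mpr (by simpa using hc)
        rw [this] at hh; simp at hh
      have hsh' : PySem.Chars.startswith line.toList ['#'] = true := by simpa using hsh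
      have hsw' : PySem.Chars.startswith line.toList ['/'] = false := by simpa using hsw
      have hpre' : sec = none → ((rest.takeWhile (fun l => !PySem.Str.startswith l "/")).all (fun l => !pvIsTermLine l)) = true := by
        intro hsec
        have h2 := hpre hsec
        rw [List.takeWhile_cons] at h2
        simp [pvIsTermLine, hsw', hsh'] at h2
        simp [pvIsTermLine]
        exact h2
      simp only [exportALoop, exportRecsLoop]
      rw [if_neg h0, if_neg hs, if_pos hh]
      rw [show (line = "" || PySem.Str.startswith line "#") = true from by simp [hsh']]
      rw [if_pos rfl]
      exact ih sec buf acc hpre'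
    · have hsw : PySem.Str.startswith line "/" = false := by
        by_contra hc
        have := (pv_first_char line "/" '/' rfl h0).mpr (by simpa using hc)
        exact hs this
      have hsh : PySem.Str.startswith line "#" = false := by
        by_contra hc
        have := (pv_first_char line "#" '#' rfl h0).mpr (by simpa using hc)
        exact hh this
      have hsw' : PySem.Chars.startswith line.toList ['/'] = false := by simpa using hsw
      have hsh' : PySem.Chars.startswith line.toList ['#'] = false := by simpa using hsh
      by_cases hb : PySem.Str.slice line (some (-1)) none = "\\"
      · have hew : PySem.Str.endswith line "\\" = true := (pv_last_char line).mp hb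
        have hew' : PySem.Chars.endswith line.toList ['\\'] = true := by simpa using hew
        have hpre' : sec = none → ((rest.takeWhile (fun l => !PySem.Str.startswith l "/")).all (fun l => !pvIsTermLine l)) = true := by
          intro hsec
          have h2 := hpre hsec
          rw [List.takeWhile_cons] at h2
          simp [pvIsTermLine, hsw', hew'] at h2
          simp [pvIsTermLine]
          exact h2
        simp only [exportALoop, exportRecsLoop]
        rw [if_neg h0, if_neg hs, if_neg hh, if_pos hb]
        rw [show (line = "" || PySem.Str.startswith line "#") = false from by simp [h0, hsh']]
        rw [if_neg (by simp), if_neg (by simp [hsw']), if_pos hew]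
        exact ih sec _ acc hpre'
      · have hew : PySem.Str.endswith line "\\" = false := by
          by_contra hc
          exact hb ((pv_last_char line).mpr (by simpa using hc))
        have hew' : PySem.Chars.endswith line.toList ['\\'] = false := by simpa using hew
        match sec with
        | none =>
          exfalso
          have h2 := hpre rfl
          rw [List.takeWhile_cons] at h2
          simp [pvIsTermLine, h0, hsw', hsh', hew'] at h2
        | some s =>
          simp only [exportALoop, exportRecsLoop]
          rw [if_neg h0, if_neg hs, if_neg hh, if_neg hb]
          rw [show (line = "" || PySem.Str.startswith line "#") = false from by simp [h0, hsh']]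
          rw [if_neg (by simp), if_neg (by simp [hsw']), if_neg (by simp [hew'])]
          rw [ih (some s) [] _ (by intro hc; cases hc)]
          rw [exportEmit]
          rw [pv_join_cons]
          simp

-- ===== VERDICT (by name: the statement is the Claim_ definition above) =====
theorem export_concat_spec : Claim_equal_export_concat := by
  intro cfg _ hpre
  unfold Spec_export_concat export_concat export_concat_alt
  simpa using pv_main cfg none [] [] (fun _ => hpre)
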